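-- pv_equiv track=rewrite | github.com/t3dy/QueryPat | scripts/enrich/enrich_reading_excerpts.py | select_best_excerpt
-- ===== SOURCE A (Python) =====
-- def select_best_excerpt(quotes: list) -> str | None:
--     """Select the best reading excerpt from a list of quote strings."""
--     if not quotes:
--         return None
--
--     # Clean quotes: strip outer quotes and whitespace
--     cleaned = []
--     for q in quotes:
--         if not isinstance(q, str):
--             continue
--         q = q.strip()
--         if q.startswith('"') and q.endswith('"'):
--             q = q[1:-1]
--         if q.startswith("'") and q.endswith("'"):
--             q = q[1:-1]
--         q = q.strip()
--         if len(q) > 15: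
--             cleaned.append(q)
--
--     if not cleaned:
--         return None
--
--     # Prefer quotes in the sweet spot (50-250 chars)
--     ideal = [q for q in cleaned if 50 <= len(q) <= 250]
--     if ideal:
--         return ideal[0]
--
--     # Fall back to moderate length (30-400 chars)
--     moderate = [q for q in cleaned if 30 <= len(q) <= 400]
--     if moderate:
--         q = moderate[0]
--         if len(q) > 250:
--             # Truncate at sentence boundary
--             sentences = q.split('.')
--             result = sentences[0] + '.'
--             if len(result) > 30:
--                 return result
--             if len(sentences) > 1:
--                 result += ' ' + sentences[1] + '.'
--                 return result
--         return q
--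
--     # Last resort: take whatever we have
--     q = cleaned[0]
--     if len(q) > 250:
--         return q[:247] + '...'
--     return q
-- ===== SOURCE B (Python) =====
-- def _clean(q):
--     q = q.strip()
--     if q.startswith('"') and q.endswith('"'):
--         q = q[1:-1]
--     if q.startswith("'") and q.endswith("'"):
--         q = q[1:-1]
--     q = q.strip()
--     return q if len(q) > 15 else None
--
--
-- def select_best_excerpt(quotes: list) -> str | None:
--     """Select the best reading excerpt from a list of quote strings."""
--     first_moderate = None
--     first_cleaned = None
--     for q in quotes:
--         if not isinstance(q, str):
--             continue
--         c = _clean(q)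
--         if c is None:
--             continue
--         if 50 <= len(c) <= 250:
--             return c
--         if first_moderate is None and 30 <= len(c) <= 400:
--             first_moderate = c
--         if first_cleaned is None:
--             first_cleaned = c
--     if first_moderate is not None:
--         q = first_moderate
--         if len(q) > 250:
--             sentences = q.split('.')
--             result = sentences[0] + '.'
--             if len(result) > 30:
--                 return result
--             if len(sentences) > 1:
--                 result += ' ' + sentences[1] + '.'
--                 return result
--         return q
--     if first_cleaned is not None:
--         q = first_cleaned
--         if len(q) > 250:
--             return q[:247] + '...'
--         return q
--     return None
-- ===== Notes on version B (the rewrite author's own statement) =====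
-- stated objective: alternative
-- what changed: A builds a cleaned list and then makes three more passes (ideal/moderate comprehensions plus a last-resort lookup); B does one pass over quotes, cleaning each string and keeping first-match accumulators, returning immediately at the first ideal-length quote and replaying A's fallback truncation blocks after the loop.
import Mathlib
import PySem

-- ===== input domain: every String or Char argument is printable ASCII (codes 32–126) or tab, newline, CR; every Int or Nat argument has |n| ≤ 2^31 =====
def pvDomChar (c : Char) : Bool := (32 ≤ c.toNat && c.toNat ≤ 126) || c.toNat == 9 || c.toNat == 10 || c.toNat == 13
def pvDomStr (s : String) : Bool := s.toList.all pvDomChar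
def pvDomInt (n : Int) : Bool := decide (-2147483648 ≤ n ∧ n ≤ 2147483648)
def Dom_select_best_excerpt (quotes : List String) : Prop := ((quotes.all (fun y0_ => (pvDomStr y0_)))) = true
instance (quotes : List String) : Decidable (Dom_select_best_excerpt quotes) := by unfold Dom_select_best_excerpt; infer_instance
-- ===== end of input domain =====

-- B merges A's four list passes (cleaning loop + three comprehension/fallback scans) into ONE pass
-- with first-match accumulators; same return value everywhere (objective: alternative).

-- shared small helpers: code both Pythons contain verbatim —
-- the strip/unquote/strip cleaning steps (A runs them inline in its loop body, B in _clean),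
-- the two length-range tests, and the two byte-identical fallback blocks
def pvCleanStr (q : String) : String :=
  let q1 := PySem.Str.strip q
  let q2 := if PySem.Str.startswith q1 "\"" && PySem.Str.endswith q1 "\"" then
              PySem.Str.slice q1 (some 1) (some (-1)) else q1
  let q3 := if PySem.Str.startswith q2 "'" && PySem.Str.endswith q2 "'" then
              PySem.Str.slice q2 (some 1) (some (-1)) else q2
  PySem.Str.strip q3

def pvIsIdeal (q : String) : Bool := decide (50 ≤ PySem.Str.len q) && decide (PySem.Str.len q ≤ 250)
def pvIsMod (q : String) : Bool := decide (30 ≤ PySem.Str.len q) && decide (PySem.Str.len q ≤ 400)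

-- ('.split(".")' has a nonempty separator, so PySem.Str.split? is always 'some': '.getD []' is exact;
--  'sentences[0]' is safe because str.split always returns a nonempty list: '.headD ""' is exact)
def pvModerateResult (q : String) : Option String :=
  if PySem.Str.len q > 250 then
    let sentences := (PySem.Str.split? q ".").getD []
    let result := sentences.headD "" ++ "."
    if PySem.Str.len result > 30 then some result
    else if sentences.length > 1 then some (result ++ " " ++ sentences.getD 1 "" ++ ".")
    else some q
  else some q

def pvLastResult (q : String) : Option String :=
  if PySem.Str.len q > 250 then some (PySem.Str.slice q none (some 247) ++ "...")
  else some q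

-- ===== PORT A =====
-- A's loop body: clean one quote, append it to 'cleaned' when long enough
def pvStepA (acc : List String) (q : String) : List String :=
  let c := pvCleanStr q
  if PySem.Str.len c > 15 then acc ++ [c] else acc

-- port of A: build 'cleaned' with a fold of the loop body, then the comprehension + fallback passes
def select_best_excerpt (quotes : List String) : Option String :=
  if quotes = [] then none
  else
    let cleaned := quotes.foldl pvStepA []
    match cleaned with
    | [] => none
    | c0 :: _ =>
      match cleaned.filter pvIsIdeal with
      | c :: _ => some c
      | [] =>
        match cleaned.filter pvIsMod with
        | m :: _ => pvModerateResult m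
        | [] => pvLastResult c0

-- ===== PORT B =====
-- B's helper _clean: the cleaning steps, 'some' only when the result is long enough
def pvClean (q : String) : Option String :=
  let c := pvCleanStr q
  if PySem.Str.len c > 15 then some c else none

-- the code after B's loop (the two fallback blocks)
def pvFinishB (firstModerate firstCleaned : Option String) : Option String :=
  match firstModerate with
  | some m => pvModerateResult m
  | none =>
    match firstCleaned with
    | some c => pvLastResult c
    | none => none

-- B's loop body for one quote: given _clean's result and the continuation on the
-- updated accumulators, return at the first ideal quote, else keep first matches
def pvLoopStep (o : Option String) (k : Option String → Option String → Option String)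
    (firstModerate firstCleaned : Option String) : Option String :=
  match o with
  | none => k firstModerate firstCleaned
  | some c =>
    if pvIsIdeal c then some c
    else
      k (if firstModerate.isNone && pvIsMod c then some c else firstModerate)
        (if firstCleaned.isNone then some c else firstCleaned)

-- B's single pass with first-match accumulators
def pvLoopB : List String → Option String → Option String → Option String
  | [], firstModerate, firstCleaned => pvFinishB firstModerate firstCleaned
  | q :: rest, firstModerate, firstCleaned =>
    pvLoopStep (pvClean q) (pvLoopB rest) firstModerate firstCleaned

def select_best_excerpt_alt (quotes : List String) : Option String :=
  pvLoopB quotes none none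

-- ===== PRECONDITION & SPEC =====
def Spec_select_best_excerpt (quotes : List String) (out : Option String) : Prop := out = select_best_excerpt_alt quotes
instance (quotes : List String) (out : Option String) : Decidable (Spec_select_best_excerpt quotes out) := by unfold Spec_select_best_excerpt; infer_instance

-- ===== CLAIM (what is proved, stated in full; the proofs are below) =====
def Claim_equal_select_best_excerpt : Prop := ∀ (quotes : List String), Dom_select_best_excerpt quotes → Spec_select_best_excerpt quotes (select_best_excerpt quotes)

-- ===== LEMMAS AND PROOFS =====

-- unfolding equations for B's loop, stated by hand ('simp only [pvLoopB]' explodes)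
theorem pvLoopB_nil (fm fc : Option String) : pvLoopB [] fm fc = pvFinishB fm fc := rfl

theorem pvLoopB_cons (q : String) (rest : List String) (fm fc : Option String) :
    pvLoopB (q :: rest) fm fc = pvLoopStep (pvClean q) (pvLoopB rest) fm fc := rfl

-- one step of A's loop = appending what B's _clean keeps
theorem stepA_eq_clean (acc : List String) (q : String) :
    pvStepA acc q = acc ++ (pvClean q).toList := by
  unfold pvStepA pvClean
  generalize pvCleanStr q = c
  show (if PySem.Str.len c > 15 then acc ++ [c] else acc)
      = acc ++ (if PySem.Str.len c > 15 then some c else none).toList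
  split <;> simp

-- A's loop produces exactly the quotes pvClean keeps, in order
theorem foldA_eq_filterMap (quotes : List String) (acc : List String) :
    quotes.foldl pvStepA acc = acc ++ quotes.filterMap pvClean := by
  induction quotes generalizing acc with
  | nil => simp only [List.foldl_nil, List.filterMap_nil, List.append_nil]
  | cons q rest ih =>
    simp only [List.foldl_cons, List.filterMap_cons, stepA_eq_clean, ih]
    cases pvClean q <;> simp

-- B's single pass computes the heads of A's filtered lists
theorem loopB_char (quotes : List String) (fm fc : Option String) :
    pvLoopB quotes fm fc =
      (((quotes.filterMap pvClean).filter pvIsIdeal).head?).elim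
        (pvFinishB (fm.or (((quotes.filterMap pvClean).filter pvIsMod).head?))
                   (fc.or ((quotes.filterMap pvClean).head?))) some := by
  induction quotes generalizing fm fc with
  | nil =>
    simp only [pvLoopB_nil, List.filterMap_nil, List.filter_nil, List.head?_nil,
      Option.elim, Option.or_none]
  | cons q rest ih =>
    cases hc : pvClean q with
    | none =>
      simp only [pvLoopB_cons, hc, pvLoopStep, List.filterMap_cons]
      exact ih fm fc
    | some c =>
      simp only [pvLoopB_cons, hc, pvLoopStep, List.filterMap_cons, List.filter_cons]
      by_cases hi : pvIsIdeal c
      · simp only [hi, ite_true, List.head?_cons, Option.elim]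
      · simp only [hi, Bool.false_eq_true, ite_false, List.head?_cons]
        rw [ih]
        have h1 : (if fm.isNone && pvIsMod c then some c else fm).or
              (((rest.filterMap pvClean).filter pvIsMod).head?)
            = fm.or ((if pvIsMod c = true then c :: (rest.filterMap pvClean).filter pvIsMod
                      else (rest.filterMap pvClean).filter pvIsMod).head?) := by
          by_cases hm : pvIsMod c <;> cases fm <;> simp [hm, Option.or]
        have h2 : (if fc.isNone then some c else fc).or ((rest.filterMap pvClean).head?)
            = fc.or (some c) := by
          cases fc <;> simp [Option.or]
        rw [h1, h2]

-- ===== VERDICT (by name: the statement is the Claim_ definition above) =====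
theorem select_best_excerpt_spec : Claim_equal_select_best_excerpt := by
  intro quotes _
  show select_best_excerpt quotes = select_best_excerpt_alt quotes
  unfold select_best_excerpt select_best_excerpt_alt
  rw [loopB_char]
  by_cases hq : quotes = []
  · subst hq
    simp [pvFinishB, Option.elim]
  · simp only [hq, ite_false]
    rw [foldA_eq_filterMap quotes []]
    simp only [List.nil_append]
    cases hcl : quotes.filterMap pvClean with
    | nil => simp [pvFinishB, Option.elim]
    | cons c0 t =>
      cases hid : (c0 :: t).filter pvIsIdeal with
      | cons d u => simp [Option.elim]
      | nil =>
        simp only [List.head?_nil, Option.elim]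
        cases hmd : (c0 :: t).filter pvIsMod with
        | cons m u => simp [pvFinishB, Option.or]
        | nil => simp [pvFinishB, Option.or]
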